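-- pv_equiv track=rewrite | github.com/yvanlok/aoc_python | 2025/day_06/part1.py | solve
-- ===== SOURCE A (Python) =====
-- import math
--
-- def solve(data):
--     """Solve the puzzle."""
--     lines = data.split("\n")
--
--     result = 0
--
--     numbers = []
--
--     operations = lines[-1].split()
--
--     for line in lines[:-1]:
--         numbers.append([int(num) for num in line.split()])
--
--     for idx in range(0, len(operations)):
--         if operations[idx] == "*":
--             result += math.prod([row[idx] for row in numbers])
--         else:
--             result += sum([row[idx] for row in numbers])
--
--     return result
-- ===== SOURCE B (Python) =====
-- import math
--
-- def solve(data):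
--     """Solve the puzzle: one row-major pass keeping running per-column products and sums."""
--     *rows, opline = data.split("\n")
--     ops = opline.split()
--     prods = [1] * len(ops)
--     sums = [0] * len(ops)
--     for line in rows:
--         vals = [int(t) for t in line.split()]
--         prods = [p * v for p, v in zip(prods, vals)]
--         sums = [s + v for s, v in zip(sums, vals)]
--     return sum(p if op == "*" else s for op, p, s in zip(ops, prods, sums))
-- ===== Notes on version B (the rewrite author's own statement) =====
-- stated objective: alternative
-- what changed: A rescans the whole row list once per operation column (column-major, rebuilding each column as a fresh list); B makes a single row-major pass that keeps running per-column products and sums via zips and then combines them with the operations in one final pass.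
import Mathlib
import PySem

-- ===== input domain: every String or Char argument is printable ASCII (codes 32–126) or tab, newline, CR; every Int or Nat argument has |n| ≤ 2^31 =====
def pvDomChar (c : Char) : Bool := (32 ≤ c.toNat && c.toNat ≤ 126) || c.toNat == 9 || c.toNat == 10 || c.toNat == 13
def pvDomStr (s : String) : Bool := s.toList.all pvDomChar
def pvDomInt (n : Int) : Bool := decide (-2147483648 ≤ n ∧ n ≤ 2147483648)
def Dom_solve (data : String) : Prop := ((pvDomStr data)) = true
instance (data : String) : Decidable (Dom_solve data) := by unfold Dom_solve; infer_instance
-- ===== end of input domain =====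

-- B replaces A's per-column rescans of the row list by a single row-major pass that keeps
-- running per-column products and sums (objective: alternative decomposition, same cost).

-- [int(num) for num in line.split()]  (the same comprehension appears in both sources)
def pvRow (line : List Char) : List Int :=
  (PySem.Chars.split₀ line).map (fun t => (PySem.Int.ofChars? t).getD 0)

-- ===== PORT A =====
def solve (data : String) : Int :=
  let lines := PySem.Chars.splitOn data.toList ['\n']
  let operations := PySem.Chars.split₀ (PySem.List.pyGetD lines (-1) [])
  let numbers := (PySem.List.slice lines none (some (-1))).foldl
      (fun acc line => acc ++ [pvRow line]) ([] : List (List Int))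
  (PySem.List.pyRange 0 (operations.length : Int) 1).foldl
    (fun result idx =>
      if PySem.List.pyGetD operations idx [] = ['*'] then
        result + (numbers.map (fun row => PySem.List.pyGetD row idx 0)).prod
      else
        result + (numbers.map (fun row => PySem.List.pyGetD row idx 0)).sum)
    0

-- ===== PORT B =====
def solve_alt (data : String) : Int :=
  let lines := PySem.Chars.splitOn data.toList ['\n']
  let rows := lines.dropLast
  let ops := PySem.Chars.split₀ (PySem.List.pyGetD lines (-1) [])
  let fin := rows.foldl
      (fun (acc : List Int × List Int) line =>
        let vals := pvRow line
        (List.zipWith (fun p v => p * v) acc.1 vals,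
         List.zipWith (fun s v => s + v) acc.2 vals))
      (List.replicate ops.length (1 : Int), List.replicate ops.length (0 : Int))
  ((ops.zip (fin.1.zip fin.2)).map (fun x => if x.1 = ['*'] then x.2.1 else x.2.2)).sum

-- ===== PRECONDITION & SPEC =====
-- Pre_ excludes exactly the inputs on which A raises: a ValueError from int() on a
-- non-integer token in a data row, or an IndexError from row[idx] when some data row has
-- fewer tokens than the last (operations) line has.
def Pre_solve (data : String) : Prop :=
  let lines := PySem.Chars.splitOn data.toList ['\n']
  let opsN := (PySem.Chars.split₀ (PySem.List.pyGetD lines (-1) [])).length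
  ∀ line ∈ lines.dropLast,
    opsN ≤ (PySem.Chars.split₀ line).length ∧
    ∀ t ∈ PySem.Chars.split₀ line, (PySem.Int.ofChars? t).isSome = true
instance (data : String) : Decidable (Pre_solve data) := by unfold Pre_solve; infer_instance

def pvWitness_solve : String := "1 2\n3 4\n* +"

def Spec_solve (data : String) (out : Int) : Prop := out = solve_alt data
instance (data : String) (out : Int) : Decidable (Spec_solve data out) := by unfold Spec_solve; infer_instance

-- ===== CLAIM (what is proved, stated in full; the proofs are below) =====
def Claim_equal_solve : Prop := ∀ (data : String), Dom_solve data → Pre_solve data → Spec_solve data (solve data)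

-- ===== LEMMAS AND PROOFS =====

-- reading a list back off by its indices
theorem pv_map_range_getD {α : Type} (xs : List α) (d : α) :
    (List.range xs.length).map (fun i => xs.getD i d) = xs := by
  apply List.ext_getElem
  · simp
  · intro i h1 h2
    simp [List.getElem?_eq_getElem h2]

-- the running product / running sum invariant of B's row-major fold
theorem pv_fold_invariant (rows : List (List Int)) (n : Nat) (ps ss : List Int)
    (hp : ps.length = n) (hs : ss.length = n) (hr : ∀ r ∈ rows, n ≤ r.length) :
    rows.foldl
      (fun (acc : List Int × List Int) r =>
        (List.zipWith (fun p v => p * v) acc.1 r,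
         List.zipWith (fun s v => s + v) acc.2 r)) (ps, ss)
    = ((List.range n).map (fun i => ps.getD i 1 * (rows.map (fun r => r.getD i 0)).prod),
       (List.range n).map (fun i => ss.getD i 0 + (rows.map (fun r => r.getD i 0)).sum)) := by
  induction rows generalizing ps ss with
  | nil =>
    subst hp
    simp only [List.foldl_nil, List.map_nil, List.prod_nil, List.sum_nil, mul_one, add_zero]
    rw [pv_map_range_getD, ← hs, pv_map_range_getD]
  | cons r rest ih =>
    have hrn : n ≤ r.length := hr r (by simp)
    simp only [List.foldl_cons]
    rw [ih _ _ (by simp [List.length_zipWith, hp]; omega) (by simp [List.length_zipWith, hs]; omega)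
        (fun x hx => hr x (List.mem_cons_of_mem _ hx))]
    simp only [Prod.mk.injEq]
    constructor
    · apply List.ext_getElem
      · simp
      · intro i h1 h2
        simp only [List.length_map, List.length_range] at h1
        have hips : i < ps.length := by omega
        have hir : i < r.length := by omega
        have hiz : i < (List.zipWith (fun p v => p * v) ps r).length := by
          simp [List.length_zipWith]; omega
        simp only [List.getElem_map, List.getElem_range, List.map_cons, List.prod_cons,
          List.getD_eq_getElem _ _ hiz, List.getD_eq_getElem _ _ hips,
          List.getD_eq_getElem _ _ hir, List.getElem_zipWith]
        ring
    · apply List.ext_getElem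
      · simp
      · intro i h1 h2
        simp only [List.length_map, List.length_range] at h1
        have hiss : i < ss.length := by omega
        have hir : i < r.length := by omega
        have hiz : i < (List.zipWith (fun s v => s + v) ss r).length := by
          simp [List.length_zipWith]; omega
        simp only [List.getElem_map, List.getElem_range, List.map_cons, List.sum_cons,
          List.getD_eq_getElem _ _ hiz, List.getD_eq_getElem _ _ hiss,
          List.getD_eq_getElem _ _ hir, List.getElem_zipWith]
        ring

-- every row A parses has at least `n` entries (Pre_, transported through pvRow)
theorem pv_row_len (line : List Char) (n : Nat)
    (h : n ≤ (PySem.Chars.split₀ line).length) : n ≤ (pvRow line).length := by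
  simpa [pvRow] using h

theorem solve_spec : Claim_equal_solve := by
  intro data _ hpre
  unfold Spec_solve solve solve_alt
  simp only []
  set lines := PySem.Chars.splitOn data.toList ['\n'] with hlines
  set ops := PySem.Chars.split₀ (PySem.List.pyGetD lines (-1) []) with hops
  set n := ops.length with hn
  -- A's numbers list is rows.map pvRow
  rw [PySem.List.slice_to_neg_one, PySem.List.foldl_append_singleton_eq_map]
  simp only [List.nil_append]
  set rows := lines.dropLast with hrows
  have hrlen : ∀ r ∈ rows.map pvRow, n ≤ r.length := by
    intro r hrm
    rcases List.mem_map.mp hrm with ⟨line, hline, rfl⟩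
    exact pv_row_len _ _ (hpre line hline).1
  -- B's fold
  have hfold := List.foldl_map (f := pvRow)
      (g := fun (acc : List Int × List Int) r =>
        (List.zipWith (fun p v => p * v) acc.1 r, List.zipWith (fun s v => s + v) acc.2 r))
      (l := rows) (init := (List.replicate n (1 : Int), List.replicate n (0 : Int)))
  beta_reduce at hfold
  rw [← hfold, pv_fold_invariant (rows.map pvRow) n _ _ (by simp) (by simp) hrlen]
  -- A's loop: fold of a sum
  have hbody : (fun (result : Int) (idx : Int) =>
      if PySem.List.pyGetD ops idx [] = ['*'] then
        result + ((rows.map pvRow).map (fun row => PySem.List.pyGetD row idx 0)).prod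
      else
        result + ((rows.map pvRow).map (fun row => PySem.List.pyGetD row idx 0)).sum)
      = (fun result idx => result +
          (if PySem.List.pyGetD ops idx [] = ['*'] then
            ((rows.map pvRow).map (fun row => PySem.List.pyGetD row idx 0)).prod
          else
            ((rows.map pvRow).map (fun row => PySem.List.pyGetD row idx 0)).sum)) := by
    funext result idx; split <;> rfl
  rw [hbody, PySem.List.foldl_add, PySem.List.pyRange_one]
  simp only [zero_add, Int.sub_zero, Int.toNat_natCast]
  congr 1
  apply List.ext_getElem
  · simp [hn]
  · intro i h1 h2
    simp only [List.length_map, List.length_range] at h1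
    have hiops : i < ops.length := by omega
    simp only [List.getElem_map, List.getElem_range, List.getElem_zip,
      PySem.List.pyGetD_natCast, List.getD_eq_getElem _ _ hiops,
      List.getD_replicate _ h1, one_mul, zero_add]
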